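-- pv_equiv track=rewrite | github.com/Erose112/Queens-U-Degree-Planner | backend/app/database.py | _parse_course_code_list
-- ===== SOURCE A (Python) =====
-- def _parse_course_code_list(text):
--     """Parse a space-separated string of course codes (e.g. 'ANAT 101 IDIS 150') into normalized codes."""
--     if not text or not str(text).strip():
--         return []
--     tokens = str(text).split()
--     codes = []
--     for i in range(0, len(tokens) - 1, 2):
--         codes.append((tokens[i] + tokens[i + 1]).upper())
--     return codes
-- ===== SOURCE B (Python) =====
-- def _parse_course_code_list(text):
--     """Parse a space-separated string of course codes into normalized codes."""
--     if not text or not str(text).strip():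
--         return []
--     def pairs(ts):
--         if len(ts) < 2:
--             return []
--         return [(ts[0] + ts[1]).upper()] + pairs(ts[2:])
--     return pairs(str(text).split())
-- ===== Notes on version B (the rewrite author's own statement) =====
-- stated objective: alternative
-- what changed: Replaces the even-index range(0, len-1, 2) loop with indexed appends by a structural recursion that consumes the token list two tokens at a time and builds the result front-to-back.
import Mathlib
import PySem

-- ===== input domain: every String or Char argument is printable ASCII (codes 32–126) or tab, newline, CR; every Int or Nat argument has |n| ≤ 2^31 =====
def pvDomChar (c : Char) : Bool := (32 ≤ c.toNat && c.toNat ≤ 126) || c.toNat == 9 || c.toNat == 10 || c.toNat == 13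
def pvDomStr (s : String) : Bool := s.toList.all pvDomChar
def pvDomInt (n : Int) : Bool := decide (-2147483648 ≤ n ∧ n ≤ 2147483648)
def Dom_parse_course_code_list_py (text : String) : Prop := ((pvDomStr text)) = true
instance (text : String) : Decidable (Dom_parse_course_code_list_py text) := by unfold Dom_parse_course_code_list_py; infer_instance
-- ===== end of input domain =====

-- B replaces A's even-index range loop by a structural recursion consuming the token list two at a time (alternative decomposition, same cost).

-- ===== PORT A =====
-- loop indices i and i+1 are always < tokens.length, so the pyGetD default "" is never used; exact.
def parse_course_code_list_py (text : String) : List String :=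
  if text = "" ∨ PySem.Str.strip text = "" then []
  else
    let tokens := PySem.Str.split₀ text
    (PySem.List.pyRange 0 ((tokens.length : Int) - 1) 2).foldl
      (fun codes i =>
        codes ++ [PySem.Str.upper (PySem.List.pyGetD tokens i "" ++ PySem.List.pyGetD tokens (i + 1) "")])
      []

-- ===== PORT B =====
-- Source B's pairs: 'if len(ts) < 2: return []' is the fallthrough pattern; ts[0], ts[1], ts[2:] are a, b, rest.
def pvPairs : List String → List String
  | a :: b :: rest => PySem.Str.upper (a ++ b) :: pvPairs rest
  | _ => []

def parse_course_code_list_py_alt (text : String) : List String :=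
  if text = "" ∨ PySem.Str.strip text = "" then []
  else pvPairs (PySem.Str.split₀ text)

-- ===== PRECONDITION & SPEC =====
def Spec_parse_course_code_list_py (text : String) (out : List String) : Prop := out = parse_course_code_list_py_alt text
instance (text : String) (out : List String) : Decidable (Spec_parse_course_code_list_py text out) := by unfold Spec_parse_course_code_list_py; infer_instance

-- ===== CLAIM (what is proved, stated in full; the proofs are below) =====
def Claim_equal_parse_course_code_list_py : Prop := ∀ (text : String), Dom_parse_course_code_list_py text → Spec_parse_course_code_list_py text (parse_course_code_list_py text)

-- ===== LEMMAS AND PROOFS =====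

lemma pvPairs_eq_map (ts : List String) :
    pvPairs ts
      = (List.range (ts.length / 2)).map
          (fun k => PySem.Str.upper (ts.getD (2 * k) "" ++ ts.getD (2 * k + 1) "")) := by
  induction ts using pvPairs.induct with
  | case1 a b rest ih =>
    have hlen : (a :: b :: rest).length / 2 = rest.length / 2 + 1 := by
      simp [List.length]; omega
    rw [hlen, List.range_succ_eq_map]
    show PySem.Str.upper (a ++ b) :: pvPairs rest = _
    rw [ih]
    simp only [List.map_cons, List.map_map]
    congr 1
  | case2 ts h =>
    match ts, h with
    | [], _ => simp [pvPairs]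
    | [x], _ => simp [pvPairs]
    | a :: b :: r, h => exact (h a b r rfl).elim

lemma pvFoldl_eq_pvPairs (ts : List String) :
    (PySem.List.pyRange 0 ((ts.length : Int) - 1) 2).foldl
      (fun codes i =>
        codes ++ [PySem.Str.upper (PySem.List.pyGetD ts i "" ++ PySem.List.pyGetD ts (i + 1) "")])
      []
    = pvPairs ts := by
  rw [PySem.List.pyRange_of_pos 0 ((ts.length : Int) - 1) (by omega), List.foldl_map,
      PySem.List.foldl_append_singleton_eq_map, List.nil_append, pvPairs_eq_map]
  have hq : (if (0:Int) < (ts.length : Int) - 1 then (((ts.length : Int) - 1 - 0 + 2 - 1) / 2).toNat else 0)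
      = ts.length / 2 := by
    split <;> omega
  rw [hq]
  refine List.map_congr_left (fun k hk => ?_)
  have h1 : (0 : Int) + 2 * (k : Int) = ((2 * k : Nat) : Int) := by push_cast; ring
  have h2 : ((2 * k : Nat) : Int) + 1 = ((2 * k + 1 : Nat) : Int) := by push_cast; ring
  rw [h1, h2, PySem.List.pyGetD_natCast, PySem.List.pyGetD_natCast]

-- ===== VERDICT (by name: the statement is the Claim_ definition above) =====
theorem parse_course_code_list_py_spec : Claim_equal_parse_course_code_list_py := by
  intro text _
  unfold Spec_parse_course_code_list_py parse_course_code_list_py parse_course_code_list_py_alt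
  split_ifs with h
  · rfl
  · exact pvFoldl_eq_pvPairs _
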